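-- pv_equiv track=rewrite | github.com/pickspromlb-app/pickspromlb | app/collectors/team_stats_collector.py | _aggregate_bullpen
-- ===== SOURCE A (Python) =====
-- from typing import Dict, List, Optional
--
-- def _aggregate_bullpen(games: List[Dict]) -> Dict:
--     """Agrega stats del bullpen de N juegos"""
--     if not games:
--         return {}
--     return {
--         "bp_ip_outs": sum(g.get("bp_ip_outs", 0) for g in games),
--         "bp_h": sum(g.get("bp_h", 0) for g in games),
--         "bp_r": sum(g.get("bp_r", 0) for g in games),
--         "bp_er": sum(g.get("bp_er", 0) for g in games),
--         "bp_bb": sum(g.get("bp_bb", 0) for g in games),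
--         "bp_so": sum(g.get("bp_so", 0) for g in games),
--         "bp_hr": sum(g.get("bp_hr", 0) for g in games),
--         "bp_hbp": sum(g.get("bp_hbp", 0) for g in games),
--         "bp_tbf": sum(g.get("bp_tbf", 0) for g in games),
--     }
-- ===== SOURCE B (Python) =====
-- from typing import Dict, List, Optional
--
-- _BP_KEYS = ("bp_ip_outs", "bp_h", "bp_r", "bp_er", "bp_bb",
--             "bp_so", "bp_hr", "bp_hbp", "bp_tbf")
--
-- def _aggregate_bullpen(games: List[Dict]) -> Dict:
--     """Agrega stats del bullpen de N juegos.
--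
--     Scatter aggregation: stream over each game's own items and bucket-add
--     the ones that are bullpen keys, instead of nine per-key lookups per game.
--     """
--     if not games:
--         return {}
--     totals = dict.fromkeys(_BP_KEYS, 0)
--     for g in games:
--         for k, v in g.items():
--             if k in totals:
--                 totals[k] += v
--     return totals
-- ===== Notes on version B (the rewrite author's own statement) =====
-- stated objective: alternative
-- what changed: Replaces nine per-key gather scans (one sum(g.get(k,0)) per stat) with a scatter aggregation: one stream over each game's own items, bucket-adding any item whose key is a bullpen key into a pre-initialized totals dict; no key lookups into the games at all.
import Mathlib
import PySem

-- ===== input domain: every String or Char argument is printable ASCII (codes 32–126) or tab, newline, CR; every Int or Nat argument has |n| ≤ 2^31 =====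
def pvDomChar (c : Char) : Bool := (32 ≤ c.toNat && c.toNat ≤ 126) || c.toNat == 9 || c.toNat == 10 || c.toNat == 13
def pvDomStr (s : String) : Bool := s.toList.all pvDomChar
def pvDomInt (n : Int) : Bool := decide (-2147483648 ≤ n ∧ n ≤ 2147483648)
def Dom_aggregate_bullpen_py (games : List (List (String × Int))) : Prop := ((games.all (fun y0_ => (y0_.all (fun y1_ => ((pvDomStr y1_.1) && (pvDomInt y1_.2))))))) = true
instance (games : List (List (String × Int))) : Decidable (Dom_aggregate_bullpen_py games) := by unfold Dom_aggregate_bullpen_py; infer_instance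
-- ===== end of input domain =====

-- ===== PORT A =====
-- B replaces A's nine per-key gather scans by a scatter aggregation over each game's own
-- items; same return value (return-value equivalence only).

-- g.get(k, 0) on a dict given as an association list (first match, default 0)
def pyGetKey (g : List (String × Int)) (k : String) : Int :=
  ((g.find? (fun p => p.1 == k)).map Prod.snd).getD 0

-- sum(g.get(k, 0) for g in games)
def sumKey (games : List (List (String × Int))) (k : String) : Int :=
  games.foldl (fun acc g => acc + pyGetKey g k) 0

def aggregate_bullpen_py (games : List (List (String × Int))) : List (String × Int) :=
  if games = [] then []
  else
    [("bp_ip_outs", sumKey games "bp_ip_outs"),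
     ("bp_h", sumKey games "bp_h"),
     ("bp_r", sumKey games "bp_r"),
     ("bp_er", sumKey games "bp_er"),
     ("bp_bb", sumKey games "bp_bb"),
     ("bp_so", sumKey games "bp_so"),
     ("bp_hr", sumKey games "bp_hr"),
     ("bp_hbp", sumKey games "bp_hbp"),
     ("bp_tbf", sumKey games "bp_tbf")]

-- ===== PORT B =====
def bpKeys : List String :=
  ["bp_ip_outs", "bp_h", "bp_r", "bp_er", "bp_bb", "bp_so", "bp_hr", "bp_hbp", "bp_tbf"]

-- totals[k] += x (k is always present in totals when used)
def addTo (t : List (String × Int)) (k : String) (x : Int) : List (String × Int) :=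
  t.map (fun p => if p.1 = k then (p.1, p.2 + x) else p)

-- Source B: stream over each game's items; 'k in totals' is exactly membership in bpKeys,
-- since totals' key set is bpKeys from initialization on and += never changes it.
def aggregate_bullpen_py_alt (games : List (List (String × Int))) : List (String × Int) :=
  if games = [] then []
  else
    games.foldl
      (fun t g => g.foldl (fun t kv => if bpKeys.contains kv.1 then addTo t kv.1 kv.2 else t) t)
      (bpKeys.map (fun k => (k, 0)))

-- ===== PRECONDITION & SPEC =====
-- Pre_ only states that each inner association list represents a Python dict (no duplicate
-- keys); every input the Python functions accept satisfies it.
def Pre_aggregate_bullpen_py (games : List (List (String × Int))) : Prop :=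
  ∀ g ∈ games, (g.map Prod.fst).Nodup
instance (games : List (List (String × Int))) : Decidable (Pre_aggregate_bullpen_py games) := by unfold Pre_aggregate_bullpen_py; infer_instance

def pvWitness_aggregate_bullpen_py : (List (List (String × Int))) :=
  [[("bp_h", 3), ("x", 1)], [("bp_h", 2), ("bp_tbf", 7)]]

def Spec_aggregate_bullpen_py (games : List (List (String × Int))) (out : List (String × Int)) : Prop := out = aggregate_bullpen_py_alt games
instance (games : List (List (String × Int))) (out : List (String × Int)) : Decidable (Spec_aggregate_bullpen_py games out) := by unfold Spec_aggregate_bullpen_py; infer_instance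

-- ===== CLAIM (what is proved, stated in full; the proofs are below) =====
def Claim_equal_aggregate_bullpen_py : Prop := ∀ (games : List (List (String × Int))), Dom_aggregate_bullpen_py games → Pre_aggregate_bullpen_py games → Spec_aggregate_bullpen_py games (aggregate_bullpen_py games)

-- ===== LEMMAS AND PROOFS =====

-- total of the values carried by key k in the association list g
def occSum (g : List (String × Int)) (k : String) : Int :=
  match g with
  | [] => 0
  | (k', v) :: t => (if k' = k then v else 0) + occSum t k

theorem occSum_not_mem (g : List (String × Int)) (k : String)
    (h : k ∉ g.map Prod.fst) : occSum g k = 0 := by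
  induction g with
  | nil => rfl
  | cons p t ih =>
    simp only [List.map_cons, List.mem_cons] at h
    push Not at h
    obtain ⟨p1, p2⟩ := p
    simp only [occSum]
    rw [if_neg (fun e => h.1 e.symm), ih h.2]
    ring

theorem occSum_eq_get (g : List (String × Int)) (k : String)
    (h : (g.map Prod.fst).Nodup) : occSum g k = pyGetKey g k := by
  induction g with
  | nil => rfl
  | cons p t ih =>
    obtain ⟨p1, p2⟩ := p
    simp only [List.map_cons, List.nodup_cons] at h
    by_cases e : p1 = k
    · subst e
      simp only [occSum, pyGetKey, List.find?_cons, BEq.rfl]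
      simp [occSum_not_mem t p1 h.1]
    · simp only [occSum, if_neg e, pyGetKey, List.find?_cons]
      rw [show ((p1, p2).1 == k) = false by simp [e]]
      rw [ih h.2]
      simp [pyGetKey]

theorem sumKey_cons (k : String) (g : List (String × Int))
    (gs : List (List (String × Int))) :
    sumKey (g :: gs) k = pyGetKey g k + sumKey gs k := by
  unfold sumKey
  rw [PySem.List.foldl_add, PySem.List.foldl_add]
  simp [List.map_cons, List.sum_cons]

theorem occSum_eq_get' (g : List (String × Int))
    (h : (g.map Prod.fst).Nodup) (k : String) : occSum g k = pyGetKey g k :=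
  occSum_eq_get g k h

theorem scatter_step (k : String) (v a1 a2 a3 a4 a5 a6 a7 a8 a9 : Int) :
    (if bpKeys.contains k then addTo
      [("bp_ip_outs", a1), ("bp_h", a2), ("bp_r", a3), ("bp_er", a4), ("bp_bb", a5),
       ("bp_so", a6), ("bp_hr", a7), ("bp_hbp", a8), ("bp_tbf", a9)] k v
     else
      [("bp_ip_outs", a1), ("bp_h", a2), ("bp_r", a3), ("bp_er", a4), ("bp_bb", a5),
       ("bp_so", a6), ("bp_hr", a7), ("bp_hbp", a8), ("bp_tbf", a9)]) =
      [("bp_ip_outs", a1 + if k = "bp_ip_outs" then v else 0),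
       ("bp_h", a2 + if k = "bp_h" then v else 0),
       ("bp_r", a3 + if k = "bp_r" then v else 0),
       ("bp_er", a4 + if k = "bp_er" then v else 0),
       ("bp_bb", a5 + if k = "bp_bb" then v else 0),
       ("bp_so", a6 + if k = "bp_so" then v else 0),
       ("bp_hr", a7 + if k = "bp_hr" then v else 0),
       ("bp_hbp", a8 + if k = "bp_hbp" then v else 0),
       ("bp_tbf", a9 + if k = "bp_tbf" then v else 0)] := by
  by_cases h1 : k = "bp_ip_outs"; · subst h1; simp [bpKeys, addTo]
  by_cases h2 : k = "bp_h"; · subst h2; simp [bpKeys, addTo]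
  by_cases h3 : k = "bp_r"; · subst h3; simp [bpKeys, addTo]
  by_cases h4 : k = "bp_er"; · subst h4; simp [bpKeys, addTo]
  by_cases h5 : k = "bp_bb"; · subst h5; simp [bpKeys, addTo]
  by_cases h6 : k = "bp_so"; · subst h6; simp [bpKeys, addTo]
  by_cases h7 : k = "bp_hr"; · subst h7; simp [bpKeys, addTo]
  by_cases h8 : k = "bp_hbp"; · subst h8; simp [bpKeys, addTo]
  by_cases h9 : k = "bp_tbf"; · subst h9; simp [bpKeys, addTo]
  simp [bpKeys, h1, h2, h3, h4, h5, h6, h7, h8, h9]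

theorem scatter_game (g : List (String × Int)) (a1 a2 a3 a4 a5 a6 a7 a8 a9 : Int) :
    g.foldl (fun t kv => if bpKeys.contains kv.1 then addTo t kv.1 kv.2 else t)
      [("bp_ip_outs", a1), ("bp_h", a2), ("bp_r", a3), ("bp_er", a4), ("bp_bb", a5),
       ("bp_so", a6), ("bp_hr", a7), ("bp_hbp", a8), ("bp_tbf", a9)] =
      [("bp_ip_outs", a1 + occSum g "bp_ip_outs"),
       ("bp_h", a2 + occSum g "bp_h"),
       ("bp_r", a3 + occSum g "bp_r"),
       ("bp_er", a4 + occSum g "bp_er"),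
       ("bp_bb", a5 + occSum g "bp_bb"),
       ("bp_so", a6 + occSum g "bp_so"),
       ("bp_hr", a7 + occSum g "bp_hr"),
       ("bp_hbp", a8 + occSum g "bp_hbp"),
       ("bp_tbf", a9 + occSum g "bp_tbf")] := by
  induction g generalizing a1 a2 a3 a4 a5 a6 a7 a8 a9 with
  | nil => simp [occSum]
  | cons kv t ih =>
    obtain ⟨k, v⟩ := kv
    rw [List.foldl_cons]
    simp only []
    rw [scatter_step, ih]
    simp [occSum, add_assoc]

theorem scatter_games (gs : List (List (String × Int)))
    (hnd : ∀ g ∈ gs, (g.map Prod.fst).Nodup)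
    (a1 a2 a3 a4 a5 a6 a7 a8 a9 : Int) :
    gs.foldl
      (fun t g => g.foldl (fun t kv => if bpKeys.contains kv.1 then addTo t kv.1 kv.2 else t) t)
      [("bp_ip_outs", a1), ("bp_h", a2), ("bp_r", a3), ("bp_er", a4), ("bp_bb", a5),
       ("bp_so", a6), ("bp_hr", a7), ("bp_hbp", a8), ("bp_tbf", a9)] =
      [("bp_ip_outs", a1 + sumKey gs "bp_ip_outs"),
       ("bp_h", a2 + sumKey gs "bp_h"),
       ("bp_r", a3 + sumKey gs "bp_r"),
       ("bp_er", a4 + sumKey gs "bp_er"),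
       ("bp_bb", a5 + sumKey gs "bp_bb"),
       ("bp_so", a6 + sumKey gs "bp_so"),
       ("bp_hr", a7 + sumKey gs "bp_hr"),
       ("bp_hbp", a8 + sumKey gs "bp_hbp"),
       ("bp_tbf", a9 + sumKey gs "bp_tbf")] := by
  induction gs generalizing a1 a2 a3 a4 a5 a6 a7 a8 a9 with
  | nil => simp [sumKey]
  | cons g gs ih =>
    rw [List.foldl_cons, scatter_game,
      ih (fun g' h => hnd g' (List.mem_cons_of_mem _ h))]
    simp only [occSum_eq_get' g (hnd g (List.mem_cons_self ..)), sumKey_cons, add_assoc]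

-- ===== VERDICT (by name: the statement is the Claim_ definition above) =====
theorem aggregate_bullpen_py_spec : Claim_equal_aggregate_bullpen_py := by
  intro games _ hpre
  unfold Spec_aggregate_bullpen_py aggregate_bullpen_py aggregate_bullpen_py_alt
  by_cases h : games = []
  · simp [h]
  · rw [if_neg h, if_neg h]
    have hmap : bpKeys.map (fun k => ((k : String), (0 : Int))) =
      [("bp_ip_outs", 0), ("bp_h", 0), ("bp_r", 0), ("bp_er", 0), ("bp_bb", 0),
       ("bp_so", 0), ("bp_hr", 0), ("bp_hbp", 0), ("bp_tbf", 0)] := rfl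
    rw [hmap, scatter_games games hpre]
    simp
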